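-- pv_equiv track=rewrite | github.com/squarezw/ragent-lab | src/ragent_lab/chunking/strategies.py | modality_specific_chunking
-- ===== SOURCE A (Python) =====
-- from typing import List, Union, Dict, Any
--
-- def modality_specific_chunking(text: str) -> List[Dict[str, str]]:
--     """
--     Chunking for multi-modal content (e.g., code + text).
--
--     Args:
--         text: Input text
--
--     Returns:
--         List of dictionaries with 'type' and 'content' keys
--     """
--     chunks = []
--     current_type = None
--     buffer = ""
--
--     # Simplified logic: determine type based on line prefixes
--     for line in text.split('\n'):
--         if line.startswith('    ') or line.startswith('def ') or line.startswith('import'):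
--             if current_type != 'code':
--                 if buffer:
--                     chunks.append({"type": current_type, "content": buffer})
--                 current_type = 'code'
--                 buffer = line + '\n'
--             else:
--                 buffer += line + '\n'
--         else:
--             if current_type != 'text':
--                 if buffer:
--                     chunks.append({"type": current_type, "content": buffer})
--                 current_type = 'text'
--                 buffer = line + '\n'
--             else:
--                 buffer += line + '\n'
--
--     if buffer:
--         chunks.append({"type": current_type, "content": buffer})
--     return chunks
-- ===== SOURCE B (Python) =====
-- from typing import List, Dict
--
--
-- def modality_specific_chunking(text: str) -> List[Dict[str, str]]:
--     """Build the chunk list back-to-front: walk the lines in reverse and merge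
--     each line into the current front chunk when it has the same kind, else push
--     a new front chunk; no current-type/buffer state machine and no flush step."""
--     chunks: List[Dict[str, str]] = []
--     for line in reversed(text.split('\n')):
--         kind = 'code' if line.startswith(('    ', 'def ', 'import')) else 'text'
--         if chunks and chunks[0]["type"] == kind:
--             chunks[0] = {"type": kind, "content": line + '\n' + chunks[0]["content"]}
--         else:
--             chunks.insert(0, {"type": kind, "content": line + '\n'})
--     return chunks
-- ===== Notes on version B (the rewrite author's own statement) =====
-- stated objective: alternative
-- what changed: Instead of A's forward state machine with a current_type/buffer accumulator and explicit flushes, B builds the result back-to-front: it walks the lines in reverse and either merges each line into the front chunk (same kind) or pushes a new front chunk, so the chunk list itself is the only state and no flush step exists.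
import Mathlib
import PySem

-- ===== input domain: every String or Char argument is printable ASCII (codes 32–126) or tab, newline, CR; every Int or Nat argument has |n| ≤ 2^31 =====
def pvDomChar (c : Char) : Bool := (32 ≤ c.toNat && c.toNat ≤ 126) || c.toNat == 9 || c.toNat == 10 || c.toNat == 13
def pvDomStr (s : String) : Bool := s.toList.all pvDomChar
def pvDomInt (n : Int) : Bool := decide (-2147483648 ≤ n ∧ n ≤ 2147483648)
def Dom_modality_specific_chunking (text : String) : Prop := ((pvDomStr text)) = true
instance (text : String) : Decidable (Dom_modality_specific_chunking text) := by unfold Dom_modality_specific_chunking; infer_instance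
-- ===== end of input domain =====

-- B builds the chunk list back-to-front: it walks the lines in reverse, merging each line
-- into the front chunk of the result or pushing a new front chunk; objective: alternative
-- decomposition without A's current_type/buffer/flush state machine, same cost.

-- ===== PORT A =====
-- Python's `current_type = None` is represented by the string "" (distinct from "code"/"text");
-- it is never emitted, since a flush only happens when the buffer is nonempty, and the buffer
-- is "" exactly as long as current_type is still None.
def pvStepA (st : List (List (String × String)) × String × String) (line : String) :
    List (List (String × String)) × String × String :=
  let (chunks, current_type, buffer) := st
  if PySem.Str.startswith line "    " || PySem.Str.startswith line "def " ||
      PySem.Str.startswith line "import" then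
    if current_type ≠ "code" then
      ((if buffer ≠ "" then chunks ++ [[("type", current_type), ("content", buffer)]] else chunks),
        "code", line ++ "\n")
    else
      (chunks, current_type, buffer ++ (line ++ "\n"))
  else
    if current_type ≠ "text" then
      ((if buffer ≠ "" then chunks ++ [[("type", current_type), ("content", buffer)]] else chunks),
        "text", line ++ "\n")
    else
      (chunks, current_type, buffer ++ (line ++ "\n"))

def modality_specific_chunking (text : String) : List (List (String × String)) :=
  -- text.split('\n'): sep is the literal "\n" ≠ "", so split? never returns none
  let lines := (PySem.Str.split? text "\n").getD []
  let st := lines.foldl pvStepA ([], "", "")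
  if st.2.2 ≠ "" then st.1 ++ [[("type", st.2.1), ("content", st.2.2)]] else st.1

-- ===== PORT B =====
-- one step of B's reversed loop: merge `line` into the front chunk or push a new one
-- (chunks[0]["type"] / chunks[0]["content"] = first-match lookup on the assoc list)
def pvStepB (chunks : List (List (String × String))) (line : String) :
    List (List (String × String)) :=
  let kind := if PySem.Str.startswith line "    " || PySem.Str.startswith line "def " ||
      PySem.Str.startswith line "import" then "code" else "text"
  match chunks with
  | c :: cs =>
      if c.lookup "type" == some kind then
        [("type", kind), ("content", line ++ "\n" ++ (c.lookup "content").getD "")] :: cs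
      else
        [("type", kind), ("content", line ++ "\n")] :: c :: cs
  | [] => [("type", kind), ("content", line ++ "\n")] :: []

def modality_specific_chunking_alt (text : String) : List (List (String × String)) :=
  (((PySem.Str.split? text "\n").getD []).reverse).foldl pvStepB []

-- ===== PRECONDITION & SPEC =====
def Spec_modality_specific_chunking (text : String) (out : List (List (String × String))) : Prop := out = modality_specific_chunking_alt text
instance (text : String) (out : List (List (String × String))) : Decidable (Spec_modality_specific_chunking text out) := by unfold Spec_modality_specific_chunking; infer_instance

-- ===== CLAIM (what is proved, stated in full; the proofs are below) =====
def Claim_equal_modality_specific_chunking : Prop := ∀ (text : String), Dom_modality_specific_chunking text → Spec_modality_specific_chunking text (modality_specific_chunking text)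

-- ===== LEMMAS AND PROOFS =====

-- proof-side classifier and canonical run decomposition both ports are reduced to
def pvClassify (line : String) : String :=
  if PySem.Str.startswith line "    " || PySem.Str.startswith line "def " ||
      PySem.Str.startswith line "import" then "code" else "text"

def pvChunks : List String → List (List (String × String))
  | [] => []
  | l :: ls =>
      let k := pvClassify l
      [("type", k),
       ("content", PySem.Str.join "" ((l :: ls.takeWhile (fun x => pvClassify x == k)).map (· ++ "\n")))]
        :: pvChunks (ls.dropWhile (fun x => pvClassify x == k))
termination_by ls => ls.length
decreasing_by
  exact Nat.lt_succ_of_le (List.length_dropWhile_le _ _)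

-- A's loop from a mid-run state (type t, nonempty buffer buf): absorb the rest of the run into
-- buf, flush, and continue as pvChunks does.
def pvConsume (t buf : String) : List String → List (List (String × String))
  | [] => [[("type", t), ("content", buf)]]
  | l :: ls =>
      if pvClassify l == t then pvConsume t (buf ++ (l ++ "\n")) ls
      else [("type", t), ("content", buf)] :: pvChunks (l :: ls)

theorem pvIntercalate_nil {α : Type} (l : List (List α)) : List.intercalate [] l = l.flatten := by
  induction l with
  | nil => simp [List.intercalate]
  | cons x xs ih => cases xs <;> simp_all [List.intercalate, List.intersperse]

theorem pvJoin_cons (x : String) (xs : List String) :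
    PySem.Str.join "" (x :: xs) = x ++ PySem.Str.join "" xs := by
  simp only [PySem.Str.join, PySem.Chars.join]
  rw [show ("" : String).toList = [] from rfl, pvIntercalate_nil, pvIntercalate_nil,
    List.map_cons, List.flatten_cons]
  have h2 := String.congr_append x (String.ofList ((xs.map String.toList).flatten))
  simp only [String.toList_ofList] at h2
  exact h2.symm

theorem pvJoin_foldl (xs : List String) (acc : String) :
    acc ++ PySem.Str.join "" (xs.map (· ++ "\n")) =
      xs.foldl (fun a l => a ++ (l ++ "\n")) acc := by
  induction xs generalizing acc with
  | nil => simp [PySem.Str.join, PySem.Chars.join, pvIntercalate_nil]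
  | cons l ls ih =>
      simp only [List.map_cons, pvJoin_cons, List.foldl_cons]
      rw [← String.append_assoc, ih]

theorem pvConsume_eq (t buf : String) (ls : List String) :
    pvConsume t buf ls =
      [("type", t),
       ("content", (ls.takeWhile (fun x => pvClassify x == t)).foldl (fun a l => a ++ (l ++ "\n")) buf)]
        :: pvChunks (ls.dropWhile (fun x => pvClassify x == t)) := by
  induction ls generalizing buf with
  | nil => simp [pvConsume, pvChunks]
  | cons l ls ih =>
      by_cases h : (pvClassify l == t) = true
      · simp [pvConsume, h, ih]
      · simp only [Bool.not_eq_true] at h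
        simp [pvConsume, h]

theorem pvChunks_cons (l : String) (ls : List String) :
    pvChunks (l :: ls) = pvConsume (pvClassify l) (l ++ "\n") ls := by
  rw [pvConsume_eq, pvChunks]
  simp only [List.map_cons, pvJoin_cons]
  rw [pvJoin_foldl]

theorem pvNl_ne (a l : String) : a ++ (l ++ "\n") ≠ "" := by
  intro h
  have := congrArg String.toList h
  simp at this

theorem pvNl_ne' (l : String) : l ++ "\n" ≠ "" := by
  intro h
  have := congrArg String.toList h
  simp at this

theorem pvFoldl_eq (ls : List String) (chunks : List (List (String × String)))
    (t buf : String) (hbuf : buf ≠ "") :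
    (if (ls.foldl pvStepA (chunks, t, buf)).2.2 ≠ "" then
        (ls.foldl pvStepA (chunks, t, buf)).1 ++
          [[("type", (ls.foldl pvStepA (chunks, t, buf)).2.1),
            ("content", (ls.foldl pvStepA (chunks, t, buf)).2.2)]]
      else (ls.foldl pvStepA (chunks, t, buf)).1) =
      chunks ++ pvConsume t buf ls := by
  induction ls generalizing chunks t buf with
  | nil => simp [pvConsume, hbuf]
  | cons l ls ih =>
      simp only [List.foldl_cons]
      by_cases hc : (PySem.Str.startswith l "    " || PySem.Str.startswith l "def " ||
          PySem.Str.startswith l "import") = true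
      · have hcl : pvClassify l = "code" := by simp only [pvClassify, hc, if_true]
        by_cases ht : t = "code"
        · have hstep : pvStepA (chunks, t, buf) l = (chunks, t, buf ++ (l ++ "\n")) := by
            subst ht; simp only [pvStepA, hc, if_true, ne_eq, not_true_eq_false, if_false]
          have hk : (pvClassify l == t) = true := by rw [hcl, ht]; decide
          rw [hstep, ih _ _ _ (pvNl_ne buf l)]
          simp only [pvConsume, hk, if_true]
        · have hstep : pvStepA (chunks, t, buf) l =
              (chunks ++ [[("type", t), ("content", buf)]], "code", l ++ "\n") := by
            simp only [pvStepA, hc, if_true, ne_eq, ht, not_false_eq_true, hbuf]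
          have hk : (pvClassify l == t) = false := by
            rw [hcl]; simp only [beq_eq_false_iff_ne, ne_eq]
            exact fun h => ht h.symm
          rw [hstep, ih _ _ _ (pvNl_ne' l)]
          simp only [pvConsume, hk, Bool.false_eq_true, if_false]
          rw [pvChunks_cons, hcl, List.append_assoc, List.singleton_append]
      · have hc' : (PySem.Str.startswith l "    " || PySem.Str.startswith l "def " ||
            PySem.Str.startswith l "import") = false := by
          simpa using hc
        have hcl : pvClassify l = "text" := by simp only [pvClassify, hc', Bool.false_eq_true, if_false]
        by_cases ht : t = "text"
        · have hstep : pvStepA (chunks, t, buf) l = (chunks, t, buf ++ (l ++ "\n")) := by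
            subst ht; simp only [pvStepA, hc', Bool.false_eq_true, if_false, ne_eq,
              not_true_eq_false]
          have hk : (pvClassify l == t) = true := by rw [hcl, ht]; decide
          rw [hstep, ih _ _ _ (pvNl_ne buf l)]
          simp only [pvConsume, hk, if_true]
        · have hstep : pvStepA (chunks, t, buf) l =
              (chunks ++ [[("type", t), ("content", buf)]], "text", l ++ "\n") := by
            simp only [pvStepA, hc', Bool.false_eq_true, if_false, ne_eq, ht,
              not_false_eq_true, hbuf]
            simp
          have hk : (pvClassify l == t) = false := by
            rw [hcl]; simp only [beq_eq_false_iff_ne, ne_eq]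
            exact fun h => ht h.symm
          rw [hstep, ih _ _ _ (pvNl_ne' l)]
          simp only [pvConsume, hk, Bool.false_eq_true, if_false]
          rw [pvChunks_cons, hcl, List.append_assoc, List.singleton_append]

-- A = pvChunks on the split lines
theorem pvA_eq_chunks (text : String) :
    modality_specific_chunking text = pvChunks ((PySem.Str.split? text "\n").getD []) := by
  unfold modality_specific_chunking
  cases h : (PySem.Str.split? text "\n").getD [] with
  | nil => simp [pvChunks]
  | cons l ls =>
      simp only [List.foldl_cons]
      by_cases hc : (PySem.Str.startswith l "    " || PySem.Str.startswith l "def " ||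
          PySem.Str.startswith l "import") = true
      · have hcl : pvClassify l = "code" := by simp only [pvClassify, hc, if_true]
        have hstep : pvStepA ([], "", "") l = ([], "code", l ++ "\n") := by
          simp only [pvStepA, hc, if_true, ne_eq]
          norm_num
        rw [hstep, pvFoldl_eq ls [] "code" (l ++ "\n") (pvNl_ne' l)]
        rw [pvChunks_cons, hcl, List.nil_append]
      · have hc' : (PySem.Str.startswith l "    " || PySem.Str.startswith l "def " ||
            PySem.Str.startswith l "import") = false := by
          simpa using hc
        have hcl : pvClassify l = "text" := by simp only [pvClassify, hc', Bool.false_eq_true, if_false]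
        have hstep : pvStepA ([], "", "") l = ([], "text", l ++ "\n") := by
          simp only [pvStepA, hc', Bool.false_eq_true, if_false, ne_eq]
          norm_num
        rw [hstep, pvFoldl_eq ls [] "text" (l ++ "\n") (pvNl_ne' l)]
        rw [pvChunks_cons, hcl, List.nil_append]

-- the head chunk of pvChunks carries the classification of the first line
theorem pvChunks_head_type (l : String) (ls : List String) :
    ∃ J rest, pvChunks (l :: ls) = [("type", pvClassify l), ("content", J)] :: rest := by
  rw [pvChunks]
  exact ⟨_, _, rfl⟩

-- B's reversed foldl = foldr of pvStepB = pvChunks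
theorem pvB_foldr_eq_chunks (ls : List String) :
    ls.foldr (fun l acc => pvStepB acc l) [] = pvChunks ls := by
  induction ls with
  | nil => simp [pvChunks]
  | cons l ls ih =>
      rw [List.foldr_cons, ih]
      have hkind : (if PySem.Str.startswith l "    " || PySem.Str.startswith l "def " ||
          PySem.Str.startswith l "import" then "code" else "text") = pvClassify l := rfl
      cases ls with
      | nil =>
          simp only [pvChunks, pvStepB, hkind, List.takeWhile_nil, List.dropWhile_nil,
            List.map_cons, List.map_nil, pvJoin_cons]
          have : PySem.Str.join "" ([] : List String) = "" := rfl
          rw [this]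
          simp
      | cons l' ls' =>
          obtain ⟨J, rest, hJ⟩ := pvChunks_head_type l' ls'
          rw [hJ]
          simp only [pvStepB, hkind, List.lookup]
          by_cases hk : pvClassify l = pvClassify l'
          · have hbeq : (some (pvClassify l') == some (pvClassify l)) = true := by
              rw [hk]; simp
            simp only [show (("type" : String) == "type") = true from rfl, hbeq, if_true]
            -- compute lookup "content"
            have hcont : ([("type", pvClassify l'), ("content", J)].lookup "content") = some J := by
              simp [List.lookup]
            -- now show equal to pvChunks (l :: l' :: ls')
            rw [pvChunks]
            have htw : (l' :: ls').takeWhile (fun x => pvClassify x == pvClassify l)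
                = l' :: ls'.takeWhile (fun x => pvClassify x == pvClassify l') := by
              rw [List.takeWhile_cons]
              simp [hk.symm]
            have hdw : (l' :: ls').dropWhile (fun x => pvClassify x == pvClassify l)
                = ls'.dropWhile (fun x => pvClassify x == pvClassify l') := by
              rw [List.dropWhile_cons]
              simp [hk.symm]
            rw [htw, hdw]
            -- identify J and rest from hJ against pvChunks (l'::ls')
            have hJ' : pvChunks (l' :: ls') =
                [("type", pvClassify l'),
                 ("content", PySem.Str.join "" ((l' :: ls'.takeWhile (fun x => pvClassify x == pvClassify l')).map (· ++ "\n")))]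
                  :: pvChunks (ls'.dropWhile (fun x => pvClassify x == pvClassify l')) := by
              rw [pvChunks]
            rw [hJ] at hJ'
            injection hJ' with h1 h2
            have hJeq : J = PySem.Str.join ""
                ((l' :: ls'.takeWhile (fun x => pvClassify x == pvClassify l')).map (· ++ "\n")) := by
              injection h1 with _ h1b
              injection h1b with h1c _
              exact congrArg Prod.snd h1c
            simp only [List.map_cons, pvJoin_cons]
            rw [hJeq, h2, hk]
            simp only [List.map_cons, pvJoin_cons]
            simp [String.append_assoc]
          · have hbeq : (some (pvClassify l') == some (pvClassify l)) = false := by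
              simp [beq_eq_false_iff_ne]
              exact fun h => hk h.symm
            simp only [show (("type" : String) == "type") = true from rfl, hbeq,
              Bool.false_eq_true, if_false]
            rw [pvChunks]
            have htw : (l' :: ls').takeWhile (fun x => pvClassify x == pvClassify l) = [] := by
              rw [List.takeWhile_cons]
              simp
              intro h; exact absurd h.symm hk
            have hdw : (l' :: ls').dropWhile (fun x => pvClassify x == pvClassify l) = l' :: ls' := by
              rw [List.dropWhile_cons]
              have : (pvClassify l' == pvClassify l) = false := by
                simp [beq_eq_false_iff_ne]; exact fun h => hk h.symm
              simp [this]
            rw [htw, hdw, hJ]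
            simp only [List.map_cons, List.map_nil, pvJoin_cons]
            have : PySem.Str.join "" ([] : List String) = "" := rfl
            rw [this]
            simp

-- ===== VERDICT (by name: the statement is the Claim_ definition above) =====
theorem modality_specific_chunking_spec : Claim_equal_modality_specific_chunking := by
  intro text _
  unfold Spec_modality_specific_chunking modality_specific_chunking_alt
  rw [List.foldl_reverse, pvA_eq_chunks]
  exact (pvB_foldr_eq_chunks _).symm
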